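-- pv_equiv track=rewrite | github.com/xiaoxiaoxh/DeformPAM | common/visualization_util.py | get_vis_idxs
-- ===== SOURCE A (Python) =====
-- def get_vis_idxs(batch_idx,
--         batch_size=None, this_batch_size=None,
--         vis_per_items=1, max_vis_per_epoch=None):
--     assert((batch_size is not None) or (this_batch_size is not None))
--     if this_batch_size is None:
--         this_batch_size = batch_size
--     if batch_size is None:
--         batch_size = this_batch_size
--
--     global_idxs = list()
--     selected_idxs = list()
--     vis_idxs = list()
--     for i in range(this_batch_size):
--         global_idx = batch_size * batch_idx + i
--         global_idxs.append(global_idx)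
--         vis_idx = global_idx // vis_per_items
--         vis_modulo = global_idx % vis_per_items
--         if (vis_modulo == 0) and (vis_idx < max_vis_per_epoch):
--             selected_idxs.append(i)
--             vis_idxs.append(vis_idx)
--     return global_idxs, selected_idxs, vis_idxs
-- ===== SOURCE B (Python) =====
-- def get_vis_idxs(batch_idx,
--         batch_size=None, this_batch_size=None,
--         vis_per_items=1, max_vis_per_epoch=None):
--     assert (batch_size is not None) or (this_batch_size is not None)
--     n = batch_size if this_batch_size is None else this_batch_size
--     bs = batch_size if batch_size is not None else n
--     base = bs * batch_idx
--     global_idxs = list(range(base, base + n))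
--     selected_idxs = []
--     vis_idxs = []
--     if n > 0:
--         first = base + (-base) % vis_per_items  # smallest multiple of vis_per_items >= base
--         for g in range(first, base + n, vis_per_items):
--             vis_idx = g // vis_per_items
--             if vis_idx < max_vis_per_epoch:
--                 selected_idxs.append(g - base)
--                 vis_idxs.append(vis_idx)
--     return global_idxs, selected_idxs, vis_idxs
-- ===== Notes on version B (the rewrite author's own statement) =====
-- stated objective: faster
-- what changed: B builds global_idxs with one range call and iterates only over the multiples of vis_per_items inside [base, base+n) instead of testing every index's remainder; Pre_ restricts to positive vis_per_items when the batch is nonempty (a per-item stride is naturally positive) besides the inputs on which A raises.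
-- outside the precondition, e.g. on get_vis_idxs(0, 4, 4, -2, 10): A returns ([0, 1, 2, 3], [0, 2], [0, -1]), B returns ([0, 1, 2, 3], [], [])
import Mathlib
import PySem

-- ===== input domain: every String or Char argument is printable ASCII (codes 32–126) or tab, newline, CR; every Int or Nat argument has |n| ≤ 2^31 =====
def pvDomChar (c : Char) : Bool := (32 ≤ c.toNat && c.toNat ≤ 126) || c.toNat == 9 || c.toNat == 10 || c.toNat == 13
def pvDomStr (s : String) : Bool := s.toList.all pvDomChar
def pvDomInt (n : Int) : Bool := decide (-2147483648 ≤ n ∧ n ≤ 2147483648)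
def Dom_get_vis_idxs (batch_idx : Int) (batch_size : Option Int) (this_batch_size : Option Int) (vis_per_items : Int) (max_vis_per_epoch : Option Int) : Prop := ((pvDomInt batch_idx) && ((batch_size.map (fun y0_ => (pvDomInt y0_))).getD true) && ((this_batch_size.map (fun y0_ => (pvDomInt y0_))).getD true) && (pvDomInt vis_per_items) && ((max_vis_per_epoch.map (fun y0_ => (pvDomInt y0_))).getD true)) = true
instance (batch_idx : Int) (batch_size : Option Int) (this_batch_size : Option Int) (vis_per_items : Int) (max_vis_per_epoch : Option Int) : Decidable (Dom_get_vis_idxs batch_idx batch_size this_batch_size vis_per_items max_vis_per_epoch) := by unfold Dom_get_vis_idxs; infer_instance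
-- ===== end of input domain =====

-- B collects the selected indices by stepping over the multiples of vis_per_items instead of
-- scanning every index; equivalence about return values only.
-- ===== PORT A =====
-- rendering of Python's 'vis_idx < max_vis_per_epoch' (comparison with None raises in Python; excluded by Pre_)
def visLt (vis_per_items : Int) (max_vis_per_epoch : Option Int) (g : Int) : Bool :=
  match max_vis_per_epoch with
  | some m => decide (PySem.Int.floordiv g vis_per_items < m)
  | none => false

def get_vis_idxs (batch_idx : Int) (batch_size : Option Int) (this_batch_size : Option Int) (vis_per_items : Int) (max_vis_per_epoch : Option Int) : List Int × List Int × List Int :=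
  -- assert((batch_size is not None) or (this_batch_size is not None)): failure is excluded by Pre_
  let tbs : Int := this_batch_size.getD (batch_size.getD 0)
  let bs : Int := batch_size.getD tbs
  (PySem.List.pyRange 0 tbs 1).foldl
    (fun (acc : List Int × List Int × List Int) i =>
      -- 'vis_idx < max_vis_per_epoch' with max None raises TypeError in Python; it is only reached
      -- when vis_modulo == 0, and Pre_ excludes exactly those inputs, so 'none => false' is never hit inside Pre_
      if PySem.Int.mod (bs * batch_idx + i) vis_per_items == 0 &&
          visLt vis_per_items max_vis_per_epoch (bs * batch_idx + i) then
        (acc.1 ++ [bs * batch_idx + i], acc.2.1 ++ [i], acc.2.2 ++ [PySem.Int.floordiv (bs * batch_idx + i) vis_per_items])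
      else
        (acc.1 ++ [bs * batch_idx + i], acc.2.1, acc.2.2))
    ([], [], [])

-- ===== PORT B =====
def get_vis_idxs_alt (batch_idx : Int) (batch_size : Option Int) (this_batch_size : Option Int) (vis_per_items : Int) (max_vis_per_epoch : Option Int) : List Int × List Int × List Int :=
  let n : Int := this_batch_size.getD (batch_size.getD 0)
  let bs : Int := batch_size.getD n
  let base := bs * batch_idx
  let global_idxs := PySem.List.pyRange base (base + n) 1
  if 0 < n then
    -- '(-base) % vis_per_items' raises ZeroDivisionError in Python when vis_per_items == 0; Pre_ excludes that
    let sv := (PySem.List.pyRange (base + PySem.Int.mod (-base) vis_per_items) (base + n) vis_per_items).foldl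
      (fun (acc : List Int × List Int) g =>
        -- 'vis_idx < max_vis_per_epoch' with max None raises TypeError in Python; excluded by Pre_
        if visLt vis_per_items max_vis_per_epoch g then
          (acc.1 ++ [g - base], acc.2 ++ [PySem.Int.floordiv g vis_per_items])
        else acc)
      ([], [])
    (global_idxs, sv.1, sv.2)
  else
    (global_idxs, [], [])

-- ===== PRECONDITION & SPEC =====
-- Pre_ excludes the inputs on which the Python A raises — both sizes None (AssertionError); a
-- nonempty batch with vis_per_items == 0 (ZeroDivisionError); a nonempty batch with
-- max_vis_per_epoch None whose global-index range contains a multiple (TypeError) — and, for a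
-- nonempty batch, negative vis_per_items, which is outside the natural domain of a per-item
-- visualisation stride although A still returns a value there.
def Pre_get_vis_idxs (batch_idx : Int) (batch_size : Option Int) (this_batch_size : Option Int) (vis_per_items : Int) (max_vis_per_epoch : Option Int) : Prop :=
  let n : Int := this_batch_size.getD (batch_size.getD 0)
  let bs : Int := batch_size.getD n
  (batch_size ≠ none ∨ this_batch_size ≠ none) ∧
  (n ≤ 0 ∨ (0 < vis_per_items ∧
    (max_vis_per_epoch ≠ none ∨ n ≤ PySem.Int.mod (-(bs * batch_idx)) vis_per_items)))
instance (batch_idx : Int) (batch_size : Option Int) (this_batch_size : Option Int) (vis_per_items : Int) (max_vis_per_epoch : Option Int) : Decidable (Pre_get_vis_idxs batch_idx batch_size this_batch_size vis_per_items max_vis_per_epoch) := by unfold Pre_get_vis_idxs; infer_instance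

def pvWitness_get_vis_idxs : Int × Option Int × Option Int × Int × Option Int := (1, some 4, some 4, 3, some 10)

def Spec_get_vis_idxs (batch_idx : Int) (batch_size : Option Int) (this_batch_size : Option Int) (vis_per_items : Int) (max_vis_per_epoch : Option Int) (out : List Int × List Int × List Int) : Prop := out = get_vis_idxs_alt batch_idx batch_size this_batch_size vis_per_items max_vis_per_epoch
instance (batch_idx : Int) (batch_size : Option Int) (this_batch_size : Option Int) (vis_per_items : Int) (max_vis_per_epoch : Option Int) (out : List Int × List Int × List Int) : Decidable (Spec_get_vis_idxs batch_idx batch_size this_batch_size vis_per_items max_vis_per_epoch out) := by unfold Spec_get_vis_idxs; infer_instance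

-- ===== CLAIM (what is proved, stated in full; the proofs are below) =====
def Claim_equal_get_vis_idxs : Prop := ∀ (batch_idx : Int) (batch_size : Option Int) (this_batch_size : Option Int) (vis_per_items : Int) (max_vis_per_epoch : Option Int), Dom_get_vis_idxs batch_idx batch_size this_batch_size vis_per_items max_vis_per_epoch → Pre_get_vis_idxs batch_idx batch_size this_batch_size vis_per_items max_vis_per_epoch → Spec_get_vis_idxs batch_idx batch_size this_batch_size vis_per_items max_vis_per_epoch (get_vis_idxs batch_idx batch_size this_batch_size vis_per_items max_vis_per_epoch)

-- ===== LEMMAS AND PROOFS =====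

-- A's loop shape: unconditional append to the first list, conditional append to the other two.
lemma foldA_shape (f : Int → Int) (P : Int → Bool) (h : Int → Int) (l : List Int)
    (a1 a2 a3 : List Int) :
    l.foldl (fun (acc : List Int × List Int × List Int) i =>
        if P i then (acc.1 ++ [f i], acc.2.1 ++ [i], acc.2.2 ++ [h i])
        else (acc.1 ++ [f i], acc.2.1, acc.2.2)) (a1, a2, a3)
      = (a1 ++ l.map f, a2 ++ l.filter P, a3 ++ (l.filter P).map h) := by
  induction l generalizing a1 a2 a3 with
  | nil => simp
  | cons x xs ih =>
    simp only [List.foldl_cons, List.map_cons, List.filter_cons]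
    by_cases hx : P x
    · simp [hx, ih]
    · simp [hx, ih]

-- B's loop shape: conditional append to both lists of a pair.
lemma foldB_shape (c : Int → Bool) (f h : Int → Int) (l : List Int) (a1 a2 : List Int) :
    l.foldl (fun (acc : List Int × List Int) g =>
        if c g then (acc.1 ++ [f g], acc.2 ++ [h g]) else acc) (a1, a2)
      = (a1 ++ (l.filter c).map f, a2 ++ (l.filter c).map h) := by
  induction l generalizing a1 a2 with
  | nil => simp
  | cons x xs ih =>
    simp only [List.foldl_cons, List.filter_cons]
    by_cases hx : c x
    · simp [hx, ih]
    · simp [hx, ih]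

lemma ediv_decomp (a b q r : Int) (hb : 0 < b) (h : a = b * q + r) (h0 : 0 ≤ r) (h1 : r < b) :
    a / b = q :=
  ((Int.ediv_emod_unique hb).2 ⟨by omega, h0, h1⟩).1

lemma pyRange_pos_nil {a b s : Int} (hs : 0 < s) (h : b ≤ a) :
    PySem.List.pyRange a b s = [] := by
  rw [PySem.List.pyRange_of_pos _ _ hs, if_neg (by omega)]
  simp

-- snoc lemma for positive-step ranges: raising the stop by 1 appends b iff b is hit.
lemma pyRange_succ_right_of_pos (a b s : Int) (hs : 0 < s) :
    PySem.List.pyRange a (b + 1) s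
      = PySem.List.pyRange a b s ++ (if a ≤ b ∧ s ∣ (b - a) then [b] else []) := by
  rw [PySem.List.pyRange_of_pos _ _ hs, PySem.List.pyRange_of_pos _ _ hs]
  by_cases hab : a ≤ b
  · have hc1 : (b + 1 - a + s - 1) / s = (b - a) / s + 1 := by
      have h' : b + 1 - a + s - 1 = (b - a) + 1 * s := by ring
      rw [h', Int.add_mul_ediv_right _ _ (by omega)]
    by_cases hdvd : s ∣ (b - a)
    · obtain ⟨q, hq⟩ := hdvd
      have hq0 : 0 ≤ q := by
        rcases lt_trichotomy q 0 with h | h | h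
        · nlinarith
        · omega
        · omega
      have hq2 : b - a = q * s := by rw [mul_comm]; exact hq
      have hq1 : (b - a) / s = q := ediv_decomp _ _ q 0 hs (by omega) le_rfl hs
      by_cases hb0 : a < b
      · have hc0 : (b - a + s - 1) / s = q := ediv_decomp _ _ q (s - 1) hs (by rw [mul_comm]; omega) (by omega) (by omega)
        rw [if_pos (by omega : a < b + 1), if_pos hb0, if_pos ⟨hab, ⟨q, hq⟩⟩, hc1, hq1, hc0]
        have htn : (q + 1).toNat = q.toNat + 1 := by omega
        rw [htn, List.range_succ, List.map_append]
        simp only [List.map_cons, List.map_nil]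
        have hqc : ((q.toNat : Nat) : Int) = q := Int.toNat_of_nonneg hq0
        congr 2
        rw [hqc]
        omega
      · have hba : b = a := by omega
        have hqz : q = 0 := by
          rcases lt_trichotomy q 0 with h | h | h
          · nlinarith
          · exact h
          · nlinarith
        rw [if_pos (by omega : a < b + 1), if_neg hb0, if_pos ⟨hab, ⟨q, hq⟩⟩, hc1, hq1, hqz]
        simp [hba]
    · have hb0 : a < b := by
        rcases lt_or_eq_of_le hab with h | h
        · exact h
        · exact absurd (h ▸ ⟨0, by ring⟩) hdvd
      have hr0 : 0 ≤ (b - a) % s := Int.emod_nonneg _ (by omega)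
      have hr1 : (b - a) % s < s := Int.emod_lt_of_pos _ hs
      have hrne : (b - a) % s ≠ 0 := fun h => hdvd (Int.dvd_of_emod_eq_zero h)
      have hqr : b - a = s * ((b - a) / s) + (b - a) % s := by rw [Int.emod_def]; ring
      have hc0 : (b - a + s - 1) / s = (b - a) / s + 1 :=
        ediv_decomp _ _ _ ((b - a) % s - 1) hs (by rw [mul_add, mul_one]; omega) (by omega) (by omega)
      rw [if_pos (by omega : a < b + 1), if_pos hb0, if_neg (by tauto), hc1, hc0]
      simp
  · rw [if_neg (by omega), if_neg (by omega), if_neg (by omega)]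
    simp

-- the key range identity: the multiples of s in [base, base+k) (B's iteration) are exactly
-- the shifted survivors of A's per-element divisibility test.
lemma key_range (base : Int) (s : Int) (hs : 0 < s) (k : Nat) :
    PySem.List.pyRange (base + PySem.Int.mod (-base) s) (base + (k : Int)) s
      = ((PySem.List.pyRange 0 (k : Int) 1).filter (fun i => decide (s ∣ (base + i)))).map
          (fun i => base + i) := by
  have hsne : s ≠ 0 := by omega
  rw [PySem.Int.mod_eq_emod_of_pos hs]
  have hr0 : 0 ≤ (-base) % s := Int.emod_nonneg _ hsne
  have hr1 : (-base) % s < s := Int.emod_lt_of_pos _ hs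
  have hfirst : base + (-base) % s = s * (-((-base) / s)) := by
    rw [Int.emod_def]; ring
  induction k with
  | zero =>
    rw [pyRange_pos_nil hs (by omega)]
    simp [PySem.List.pyRange]
  | succ k ih =>
    have hcast : ((k + 1 : Nat) : Int) = (k : Int) + 1 := by push_cast; ring
    rw [hcast, ← add_assoc, pyRange_succ_right_of_pos _ _ _ hs, ih,
        PySem.List.pyRange_one_succ_right (by positivity : (0:Int) ≤ (k : Int)),
        List.filter_append, List.map_append]
    congr 1
    by_cases hdvd : s ∣ (base + (k : Int))
    · have hdfirst : s ∣ (base + (-base) % s) := ⟨-((-base) / s), hfirst⟩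
      have hdvd2 : s ∣ (base + (k : Int) - (base + (-base) % s)) := dvd_sub hdvd hdfirst
      obtain ⟨e, he⟩ := hdvd2
      have hse : -s < s * e := by omega
      have he0 : 0 ≤ e := by nlinarith
      have hse0 : 0 ≤ s * e := mul_nonneg (by omega) he0
      rw [if_pos ⟨by omega, ⟨e, by omega⟩⟩]
      simp [hdvd]
    · rw [if_neg]
      · simp [hdvd]
      · rintro ⟨hle, hd2⟩
        have hdfirst : s ∣ (base + (-base) % s) := ⟨-((-base) / s), hfirst⟩
        have := dvd_add hd2 hdfirst
        simp only [sub_add_cancel] at this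
        exact hdvd this

lemma pyRange_shift (base n : Int) :
    PySem.List.pyRange base (base + n) 1
      = (PySem.List.pyRange 0 n 1).map (fun i => base + i) := by
  rw [PySem.List.pyRange_one, PySem.List.pyRange_one]
  have h : base + n - base = n - 0 := by ring
  rw [h, List.map_map]
  exact List.map_congr_left (fun k _ => by simp)

-- the whole equivalence for a fixed base, over a nonnegative length k
lemma core_equiv (base v : Int) (m : Option Int) (hv : 0 < v) (k : Nat) :
    ((PySem.List.pyRange 0 (k : Int) 1).map (fun i => base + i),
     (PySem.List.pyRange 0 (k : Int) 1).filter
       (fun i => PySem.Int.mod (base + i) v == 0 && visLt v m (base + i)),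
     ((PySem.List.pyRange 0 (k : Int) 1).filter
       (fun i => PySem.Int.mod (base + i) v == 0 && visLt v m (base + i))).map
         (fun i => PySem.Int.floordiv (base + i) v))
    = (PySem.List.pyRange base (base + (k : Int)) 1,
       ((PySem.List.pyRange (base + PySem.Int.mod (-base) v) (base + (k : Int)) v).filter
         (visLt v m)).map (fun g => g - base),
       ((PySem.List.pyRange (base + PySem.Int.mod (-base) v) (base + (k : Int)) v).filter
         (visLt v m)).map (fun g => PySem.Int.floordiv g v)) := by
  have hcomp : ((fun g => g - base) ∘ (fun i : Int => base + i)) = (fun i : Int => i) := by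
    funext i; simp
  have hcomp2 : ((fun g => PySem.Int.floordiv g v) ∘ (fun i : Int => base + i))
      = (fun i : Int => PySem.Int.floordiv (base + i) v) := by
    funext i; rfl
  have hfe : ∀ x : Int, x ∈ PySem.List.pyRange 0 (k : Int) 1 →
      ((fun i => PySem.Int.mod (base + i) v == 0 && visLt v m (base + i)) x)
        = (((visLt v m) ∘ (fun i : Int => base + i)) x && decide (v ∣ (base + x))) := by
    intro x _
    simp only [Function.comp_apply]
    rw [Bool.eq_iff_iff]
    simp only [Bool.and_eq_true]
    constructor
    · rintro ⟨h1, h2⟩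
      refine ⟨h2, ?_⟩
      simp only [beq_iff_eq, PySem.Int.mod_eq_zero_iff_dvd] at h1
      simpa using h1
    · rintro ⟨h1, h2⟩
      refine ⟨?_, h1⟩
      simp only [decide_eq_true_eq] at h2
      simp only [beq_iff_eq, PySem.Int.mod_eq_zero_iff_dvd]
      exact h2
  simp only [Prod.mk.injEq]
  refine ⟨?_, ?_, ?_⟩
  · exact (pyRange_shift base (k : Int)).symm
  · rw [key_range base v hv k, List.filter_map, List.map_map, List.filter_filter, hcomp,
        List.map_id']
    exact List.filter_congr hfe
  · rw [key_range base v hv k, List.filter_map, List.map_map, List.filter_filter, hcomp2]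
    exact congrArg (List.map (fun i => PySem.Int.floordiv (base + i) v)) (List.filter_congr hfe)

-- ===== VERDICT (by name: the statement is the Claim_ definition above) =====
theorem get_vis_idxs_spec : Claim_equal_get_vis_idxs := by
  intro batch_idx batch_size this_batch_size vis_per_items max_vis_per_epoch _ hpre
  unfold Spec_get_vis_idxs
  obtain ⟨-, hpre2⟩ := hpre
  have hA : get_vis_idxs batch_idx batch_size this_batch_size vis_per_items max_vis_per_epoch
      = ([] ++ (PySem.List.pyRange 0 (this_batch_size.getD (batch_size.getD 0)) 1).map (fun i => ((batch_size.getD (this_batch_size.getD (batch_size.getD 0))) * batch_idx) + i),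
         [] ++ (PySem.List.pyRange 0 (this_batch_size.getD (batch_size.getD 0)) 1).filter (fun i => PySem.Int.mod (((batch_size.getD (this_batch_size.getD (batch_size.getD 0))) * batch_idx) + i) vis_per_items == 0 && (visLt vis_per_items max_vis_per_epoch (((batch_size.getD (this_batch_size.getD (batch_size.getD 0))) * batch_idx) + i))),
         [] ++ ((PySem.List.pyRange 0 (this_batch_size.getD (batch_size.getD 0)) 1).filter (fun i => PySem.Int.mod (((batch_size.getD (this_batch_size.getD (batch_size.getD 0))) * batch_idx) + i) vis_per_items == 0 && (visLt vis_per_items max_vis_per_epoch (((batch_size.getD (this_batch_size.getD (batch_size.getD 0))) * batch_idx) + i)))).map (fun i => PySem.Int.floordiv (((batch_size.getD (this_batch_size.getD (batch_size.getD 0))) * batch_idx) + i) vis_per_items)) :=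
    foldA_shape (fun i => ((batch_size.getD (this_batch_size.getD (batch_size.getD 0))) * batch_idx) + i) (fun i => PySem.Int.mod (((batch_size.getD (this_batch_size.getD (batch_size.getD 0))) * batch_idx) + i) vis_per_items == 0 && (visLt vis_per_items max_vis_per_epoch (((batch_size.getD (this_batch_size.getD (batch_size.getD 0))) * batch_idx) + i))) (fun i => PySem.Int.floordiv (((batch_size.getD (this_batch_size.getD (batch_size.getD 0))) * batch_idx) + i) vis_per_items) (PySem.List.pyRange 0 (this_batch_size.getD (batch_size.getD 0)) 1) [] [] []
  by_cases hn0 : 0 < (this_batch_size.getD (batch_size.getD 0))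
  · have hv : 0 < vis_per_items := by
      rcases hpre2 with h | ⟨h, -⟩
      · omega
      · exact h
    have hB : get_vis_idxs_alt batch_idx batch_size this_batch_size vis_per_items max_vis_per_epoch
        = (if 0 < (this_batch_size.getD (batch_size.getD 0)) then
            (PySem.List.pyRange ((batch_size.getD (this_batch_size.getD (batch_size.getD 0))) * batch_idx) (((batch_size.getD (this_batch_size.getD (batch_size.getD 0))) * batch_idx) + (this_batch_size.getD (batch_size.getD 0))) 1,
             ([] ++ ((PySem.List.pyRange (((batch_size.getD (this_batch_size.getD (batch_size.getD 0))) * batch_idx) + PySem.Int.mod (-((batch_size.getD (this_batch_size.getD (batch_size.getD 0))) * batch_idx)) vis_per_items) (((batch_size.getD (this_batch_size.getD (batch_size.getD 0))) * batch_idx) + (this_batch_size.getD (batch_size.getD 0))) vis_per_items).filter (visLt vis_per_items max_vis_per_epoch)).map (fun g => g - ((batch_size.getD (this_batch_size.getD (batch_size.getD 0))) * batch_idx))),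
             ([] ++ ((PySem.List.pyRange (((batch_size.getD (this_batch_size.getD (batch_size.getD 0))) * batch_idx) + PySem.Int.mod (-((batch_size.getD (this_batch_size.getD (batch_size.getD 0))) * batch_idx)) vis_per_items) (((batch_size.getD (this_batch_size.getD (batch_size.getD 0))) * batch_idx) + (this_batch_size.getD (batch_size.getD 0))) vis_per_items).filter (visLt vis_per_items max_vis_per_epoch)).map (fun g => PySem.Int.floordiv g vis_per_items)))
          else (PySem.List.pyRange ((batch_size.getD (this_batch_size.getD (batch_size.getD 0))) * batch_idx) (((batch_size.getD (this_batch_size.getD (batch_size.getD 0))) * batch_idx) + (this_batch_size.getD (batch_size.getD 0))) 1, ([] : List Int), ([] : List Int))) := by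
      show (if 0 < (this_batch_size.getD (batch_size.getD 0)) then _ else _) = _
      rw [if_pos hn0, if_pos hn0]
      have hfold := foldB_shape (visLt vis_per_items max_vis_per_epoch) (fun g => g - ((batch_size.getD (this_batch_size.getD (batch_size.getD 0))) * batch_idx)) (fun g => PySem.Int.floordiv g vis_per_items) (PySem.List.pyRange (((batch_size.getD (this_batch_size.getD (batch_size.getD 0))) * batch_idx) + PySem.Int.mod (-((batch_size.getD (this_batch_size.getD (batch_size.getD 0))) * batch_idx)) vis_per_items) (((batch_size.getD (this_batch_size.getD (batch_size.getD 0))) * batch_idx) + (this_batch_size.getD (batch_size.getD 0))) vis_per_items) [] []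
      exact congrArg (fun p => (PySem.List.pyRange ((batch_size.getD (this_batch_size.getD (batch_size.getD 0))) * batch_idx) (((batch_size.getD (this_batch_size.getD (batch_size.getD 0))) * batch_idx) + (this_batch_size.getD (batch_size.getD 0))) 1, p.1, p.2)) hfold
    rw [hA, hB, if_pos hn0]
    simp only [List.nil_append]
    obtain ⟨k, hk⟩ : ∃ k : Nat, (this_batch_size.getD (batch_size.getD 0)) = (k : Int) := ⟨((this_batch_size.getD (batch_size.getD 0))).toNat, by omega⟩
    rw [hk]
    exact core_equiv (batch_size.getD (k : Int) * batch_idx) vis_per_items max_vis_per_epoch hv k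
  · have hB : get_vis_idxs_alt batch_idx batch_size this_batch_size vis_per_items max_vis_per_epoch
        = (PySem.List.pyRange ((batch_size.getD (this_batch_size.getD (batch_size.getD 0))) * batch_idx) (((batch_size.getD (this_batch_size.getD (batch_size.getD 0))) * batch_idx) + (this_batch_size.getD (batch_size.getD 0))) 1, ([] : List Int), ([] : List Int)) := by
      show (if 0 < (this_batch_size.getD (batch_size.getD 0)) then _ else _) = _
      rw [if_neg hn0]
    have hnil : (PySem.List.pyRange 0 (this_batch_size.getD (batch_size.getD 0)) 1) = [] := PySem.List.pyRange_one_eq_nil (by omega)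
    have hnil2 : PySem.List.pyRange ((batch_size.getD (this_batch_size.getD (batch_size.getD 0))) * batch_idx) (((batch_size.getD (this_batch_size.getD (batch_size.getD 0))) * batch_idx) + (this_batch_size.getD (batch_size.getD 0))) 1 = [] :=
      pyRange_pos_nil one_pos (by omega)
    rw [hA, hB, hnil, hnil2]
    simp
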